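-- pv_equiv track=rewrite | github.com/Nouman64-cat/Zygotrix | backend/app/services/analytics.py | _accumulate_trait_usage
-- ===== SOURCE A (Python) =====
-- from typing import Optional, List, Dict, Any, Tuple
-- from collections import defaultdict, Counter
--
-- def _accumulate_trait_usage(  # noqa: C901
--     projects: List[Dict[str, Any]], trait_filter: Optional[List[str]]
-- ) -> Counter:
--     trait_counter: Counter = Counter()
--     for p in projects:
--         for tool in p.get("tools") or []:
--             cfg = tool.get("trait_configurations") or {}
--             for key in cfg.keys():
--                 if not trait_filter or key in trait_filter:
--                     trait_counter[key] += 1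
--             sim = tool.get("simulation_results") or {}
--             for key in sim.keys():
--                 if not trait_filter or key in trait_filter:
--                     trait_counter[key] += 1
--     return trait_counter
-- ===== SOURCE B (Python) =====
-- from typing import Optional, List, Dict, Any
-- from collections import Counter
--
--
-- def _accumulate_trait_usage(
--     projects: List[Dict[str, Any]], trait_filter: Optional[List[str]]
-- ) -> Counter:
--     # Staged passes with no incremental counter at all:
--     # 1) flatten every tool's two sections into one flat key list,
--     # 2) restrict that list to the filter (if any),
--     # 3) for each distinct key (first-occurrence order) count it by scanning the list.
--     keys: List[str] = []
--     for p in projects: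
--         for tool in p.get("tools") or []:
--             keys += list(tool.get("trait_configurations") or {})
--             keys += list(tool.get("simulation_results") or {})
--     if trait_filter:
--         keys = [k for k in keys if k in trait_filter]
--     return Counter({k: keys.count(k) for k in dict.fromkeys(keys)})
-- ===== Notes on version B (the rewrite author's own statement) =====
-- stated objective: alternative
-- what changed: B keeps no running counter: it flattens all section keys into one list, restricts it to the filter, and then counts each distinct key (in first-occurrence order) by a list.count scan, versus A's nested loops incrementing a Counter under an in-loop filter test.
import Mathlib
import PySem

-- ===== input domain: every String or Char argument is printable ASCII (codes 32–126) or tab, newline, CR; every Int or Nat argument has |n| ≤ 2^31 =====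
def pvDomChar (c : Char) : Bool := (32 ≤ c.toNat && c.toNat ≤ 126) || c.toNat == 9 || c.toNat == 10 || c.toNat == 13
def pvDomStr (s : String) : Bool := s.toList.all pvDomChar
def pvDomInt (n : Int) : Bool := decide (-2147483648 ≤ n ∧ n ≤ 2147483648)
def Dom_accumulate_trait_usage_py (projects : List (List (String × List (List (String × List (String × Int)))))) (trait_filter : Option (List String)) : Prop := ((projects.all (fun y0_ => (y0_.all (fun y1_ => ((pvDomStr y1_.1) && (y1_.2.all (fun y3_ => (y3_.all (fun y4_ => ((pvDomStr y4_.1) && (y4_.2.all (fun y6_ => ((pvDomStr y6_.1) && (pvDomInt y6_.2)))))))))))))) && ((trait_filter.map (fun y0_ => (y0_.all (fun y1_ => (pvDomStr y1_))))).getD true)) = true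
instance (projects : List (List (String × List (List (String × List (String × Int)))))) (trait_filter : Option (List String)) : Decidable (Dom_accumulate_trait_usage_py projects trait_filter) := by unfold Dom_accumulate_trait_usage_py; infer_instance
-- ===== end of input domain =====

-- B drops A's running counter: it flattens all section keys into one list, restricts it to the
-- filter, and counts each distinct key by scanning that list (objective: alternative, same cost class).

-- ===== PORT A =====
-- 'not trait_filter or key in trait_filter' (None and [] are both falsy)
def pvPass (trait_filter : Option (List String)) (key : String) : Bool :=
  match trait_filter with
  | none => true
  | some f => f.isEmpty || f.contains key

def accumulate_trait_usage_py (projects : List (List (String × List (List (String × List (String × Int)))))) (trait_filter : Option (List String)) : List (String × Int) :=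
  (projects.foldl (fun trait_counter p =>
      ((((PySem.Dict.mk p).get? "tools").getD []).foldl (fun trait_counter tool =>
        -- cfg = tool.get("trait_configurations") or {}  (a missing key and an empty dict both give {})
        let cfg := ((PySem.Dict.mk tool).get? "trait_configurations").getD []
        let trait_counter :=
          ((PySem.Dict.mk cfg).keys).foldl (fun c key =>
            if pvPass trait_filter key then c.modify key 0 (· + 1) else c) trait_counter
        let sim := ((PySem.Dict.mk tool).get? "simulation_results").getD []
        ((PySem.Dict.mk sim).keys).foldl (fun c key =>
          if pvPass trait_filter key then c.modify key 0 (· + 1) else c) trait_counter)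
        trait_counter))
    PySem.Dict.empty).items

-- ===== PORT B =====
-- pass 1+2 of Source B: the flat key list, then its restriction to the filter
def pvFilteredKeys (projects : List (List (String × List (List (String × List (String × Int)))))) (trait_filter : Option (List String)) : List String :=
  let keys := projects.foldl (fun keys p =>
    (((PySem.Dict.mk p).get? "tools").getD []).foldl (fun keys tool =>
      keys ++ ((PySem.Dict.mk (((PySem.Dict.mk tool).get? "trait_configurations").getD [])).keys)
           ++ ((PySem.Dict.mk (((PySem.Dict.mk tool).get? "simulation_results").getD [])).keys)) keys) []
  match trait_filter with
  | none => keys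
  | some f => if f.isEmpty then keys else keys.filter (fun k => f.contains k)

def accumulate_trait_usage_py_alt (projects : List (List (String × List (List (String × List (String × Int)))))) (trait_filter : Option (List String)) : List (String × Int) :=
  let keys := pvFilteredKeys projects trait_filter
  -- {k: keys.count(k) for k in dict.fromkeys(keys)}: distinct keys in first-occurrence order,
  -- each counted by a scan of the flat list
  (PySem.Set.ofList keys).map (fun k => (k, (keys.count k : Int)))

-- ===== PRECONDITION & SPEC =====
def Spec_accumulate_trait_usage_py (projects : List (List (String × List (List (String × List (String × Int)))))) (trait_filter : Option (List String)) (out : List (String × Int)) : Prop := out = accumulate_trait_usage_py_alt projects trait_filter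
instance (projects : List (List (String × List (List (String × List (String × Int)))))) (trait_filter : Option (List String)) (out : List (String × Int)) : Decidable (Spec_accumulate_trait_usage_py projects trait_filter out) := by unfold Spec_accumulate_trait_usage_py; infer_instance

-- ===== CLAIM (what is proved, stated in full; the proofs are below) =====
def Claim_equal_accumulate_trait_usage_py : Prop := ∀ (projects : List (List (String × List (List (String × List (String × Int)))))) (trait_filter : Option (List String)), Dom_accumulate_trait_usage_py projects trait_filter → Spec_accumulate_trait_usage_py projects trait_filter (accumulate_trait_usage_py projects trait_filter)

-- ===== LEMMAS AND PROOFS =====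

-- both programs visit the same flat sequence of keys; name it once
def pvKeyStream (projects : List (List (String × List (List (String × List (String × Int)))))) : List String :=
  projects.flatMap (fun p =>
    (((PySem.Dict.mk p).get? "tools").getD []).flatMap (fun tool =>
      ((PySem.Dict.mk (((PySem.Dict.mk tool).get? "trait_configurations").getD [])).keys)
        ++ ((PySem.Dict.mk (((PySem.Dict.mk tool).get? "simulation_results").getD [])).keys)))

-- A's nested filtered-count loops are the filtered-count fold over the flat key stream
theorem pvA_eq_foldl_stream (projects : List (List (String × List (List (String × List (String × Int)))))) (trait_filter : Option (List String)) :
    accumulate_trait_usage_py projects trait_filter =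
      ((pvKeyStream projects).foldl
        (fun c key => if pvPass trait_filter key then c.modify key 0 (· + 1) else c)
        PySem.Dict.empty).items := by
  simp [accumulate_trait_usage_py, pvKeyStream, List.foldl_flatMap]

-- counting only the keys that pass the filter = counting the filtered key list
theorem pvFoldl_if_eq_filter (p : String → Bool) (ks : List String) (d : PySem.Dict String Int) :
    ks.foldl (fun c key => if p key then c.modify key 0 (· + 1) else c) d =
      (ks.filter p).foldl (fun c key => c.modify key 0 (· + 1)) d := by
  induction ks generalizing d with
  | nil => rfl
  | cons a ks ih =>
    by_cases h : p a = true <;>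
      simp [h, List.foldl_cons, ih]

-- B's append-accumulating loops build exactly the filtered flat key stream
theorem pvFilteredKeys_eq (projects : List (List (String × List (List (String × List (String × Int)))))) (trait_filter : Option (List String)) :
    pvFilteredKeys projects trait_filter = (pvKeyStream projects).filter (pvPass trait_filter) := by
  have hkeys : projects.foldl (fun keys p =>
      (((PySem.Dict.mk p).get? "tools").getD []).foldl (fun keys tool =>
        keys ++ ((PySem.Dict.mk (((PySem.Dict.mk tool).get? "trait_configurations").getD [])).keys)
             ++ ((PySem.Dict.mk (((PySem.Dict.mk tool).get? "simulation_results").getD [])).keys)) keys) [] =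
      pvKeyStream projects := by
    simp [pvKeyStream, List.append_assoc, List.flatMap_def]
  match trait_filter with
  | none =>
    rw [show pvPass none = fun _ => true from rfl, List.filter_true]
    simpa [pvFilteredKeys] using hkeys
  | some f =>
    by_cases hf : f.isEmpty = true
    · rw [show pvPass (some f) = fun _ => true from funext fun k => by simp [pvPass, hf],
          List.filter_true]
      simpa [pvFilteredKeys, hf] using hkeys
    · have hp : (pvPass (some f)) = fun k => f.contains k := by
        funext k; simp [pvPass, hf]
      rw [hp]
      simpa [pvFilteredKeys, hf] using congrArg (List.filter (fun k => f.contains k)) hkeys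

-- ===== VERDICT (by name: the statement is the Claim_ definition above) =====
theorem accumulate_trait_usage_py_spec : Claim_equal_accumulate_trait_usage_py := by
  intro projects trait_filter _
  show accumulate_trait_usage_py projects trait_filter = _
  rw [pvA_eq_foldl_stream, pvFoldl_if_eq_filter, ← PySem.Dict.counter_eq_foldl,
      PySem.Dict.items_counter]
  simp [accumulate_trait_usage_py_alt, pvFilteredKeys_eq]
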